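-- pv_equiv track=rewrite | github.com/archeltaneka/slot-filling-intent-detection | src/inference.py | get_word_shape
-- ===== SOURCE A (Python) =====
-- import string
--
-- def get_word_shape(word):
--     """Get word shape for CRF features."""
--     shape = []
--     for ch in word:
--         if ch.isupper():
--             shape.append('X')
--         elif ch.islower():
--             shape.append('x')
--         elif ch.isdigit():
--             shape.append('d')
--         elif ch in string.punctuation:
--             shape.append('p')
--         else:
--             shape.append('o')
--     collapsed = []
--     for ch in shape:
--         if not collapsed or collapsed[-1] != ch:
--             collapsed.append(ch)
--     return ''.join(collapsed)
-- ===== SOURCE B (Python) =====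
-- import string
--
-- def _shape_class(ch):
--     if ch.isupper():
--         return 'X'
--     if ch.islower():
--         return 'x'
--     if ch.isdigit():
--         return 'd'
--     if ch in string.punctuation:
--         return 'p'
--     return 'o'
--
-- def get_word_shape(word):
--     """Run-scanning: emit one symbol per maximal run of same-class characters."""
--     out = []
--     i, n = 0, len(word)
--     while i < n:
--         c = _shape_class(word[i])
--         out.append(c)
--         i += 1
--         while i < n and _shape_class(word[i]) == c:
--             i += 1
--     return ''.join(out)
-- ===== Notes on version B (the rewrite author's own statement) =====
-- stated objective: alternative
-- what changed: B is a two-pointer run scanner over the original word: it emits one symbol per maximal run of same-class characters, skipping each run with an inner index loop, instead of A's two staged passes (classify every char into a shape list, then collapse it against its own tail).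
import Mathlib
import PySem

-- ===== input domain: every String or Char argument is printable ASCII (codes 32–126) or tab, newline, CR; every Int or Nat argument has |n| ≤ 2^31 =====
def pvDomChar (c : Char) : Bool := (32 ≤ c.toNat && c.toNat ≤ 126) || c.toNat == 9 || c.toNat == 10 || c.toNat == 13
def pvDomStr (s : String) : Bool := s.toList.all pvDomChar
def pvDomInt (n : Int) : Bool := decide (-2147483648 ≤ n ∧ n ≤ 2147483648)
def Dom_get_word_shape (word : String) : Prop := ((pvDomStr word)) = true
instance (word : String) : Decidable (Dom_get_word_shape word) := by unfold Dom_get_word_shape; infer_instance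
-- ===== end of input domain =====

-- B replaces A's two staged passes (classify all chars, then collapse) by a two-pointer run
-- scanner over the original word: one symbol per maximal run of same-class characters.

-- ===== PORT A =====
-- string.punctuation
def pvPunct : List Char := "!\"#$%&'()*+,-./:;<=>?@[\\]^_`{|}~".toList

-- isupper/islower/isdigit ported as ASCII ranges: exact on the printable-ASCII+whitespace domain Dom_get_word_shape
def get_word_shape (word : String) : String :=
  let shape := word.toList.foldl (fun acc ch =>
    acc ++ [if 'A' ≤ ch ∧ ch ≤ 'Z' then 'X'
            else if 'a' ≤ ch ∧ ch ≤ 'z' then 'x'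
            else if '0' ≤ ch ∧ ch ≤ '9' then 'd'
            else if ch ∈ pvPunct then 'p'
            else 'o']) []
  let collapsed := shape.foldl (fun acc ch =>
    if acc = [] ∨ acc.getLast? ≠ some ch then acc ++ [ch] else acc) []
  String.mk collapsed

-- ===== PORT B =====
-- _shape_class, same ASCII-range reading of isupper/islower/isdigit (exact on Dom)
def shapeClass (ch : Char) : Char :=
  if 'A' ≤ ch ∧ ch ≤ 'Z' then 'X'
  else if 'a' ≤ ch ∧ ch ≤ 'z' then 'x'
  else if '0' ≤ ch ∧ ch ≤ '9' then 'd'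
  else if ch ∈ pvPunct then 'p'
  else 'o'

-- B's outer while-loop as structural recursion; the inner run-skipping while-loop is dropWhile
def runScan : List Char → List Char
  | [] => []
  | c :: t =>
    shapeClass c :: runScan (t.dropWhile (fun d => shapeClass d = shapeClass c))
termination_by l => l.length
decreasing_by
  exact Nat.lt_succ_of_le (List.length_dropWhile_le _ _)

def get_word_shape_alt (word : String) : String :=
  String.mk (runScan word.toList)

-- ===== PRECONDITION & SPEC =====
def Spec_get_word_shape (word : String) (out : String) : Prop := out = get_word_shape_alt word
instance (word : String) (out : String) : Decidable (Spec_get_word_shape word out) := by unfold Spec_get_word_shape; infer_instance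

-- ===== CLAIM (what is proved, stated in full; the proofs are below) =====
def Claim_equal_get_word_shape : Prop := ∀ (word : String), Dom_get_word_shape word → Spec_get_word_shape word (get_word_shape word)

-- ===== LEMMAS AND PROOFS =====

-- A's collapse-loop body, named for the lemmas
def collapseStep (acc : List Char) (ch : Char) : List Char :=
  if acc = [] ∨ acc.getLast? ≠ some ch then acc ++ [ch] else acc

-- A's first loop is `map shapeClass` up to appending
theorem shape_foldl_eq_map (l acc : List Char) :
    l.foldl (fun acc ch =>
      acc ++ [if 'A' ≤ ch ∧ ch ≤ 'Z' then 'X'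
              else if 'a' ≤ ch ∧ ch ≤ 'z' then 'x'
              else if '0' ≤ ch ∧ ch ≤ '9' then 'd'
              else if ch ∈ pvPunct then 'p'
              else 'o']) acc = acc ++ l.map shapeClass := by
  induction l generalizing acc with
  | nil => simp
  | cons c t ih => simp [List.foldl, ih, shapeClass]

-- the collapse loop never touches an already-emitted prefix
theorem collapse_prefix (s : List Char) (pre acc : List Char) (h : acc ≠ []) :
    s.foldl collapseStep (pre ++ acc) = pre ++ s.foldl collapseStep acc := by
  induction s generalizing acc with
  | nil => rfl
  | cons ch t ih =>
    simp only [List.foldl_cons]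
    have hl : (pre ++ acc).getLast? = acc.getLast? := List.getLast?_append_of_ne_nil _ h
    by_cases hc : acc.getLast? ≠ some ch
    · have h1 : collapseStep (pre ++ acc) ch = pre ++ (acc ++ [ch]) := by
        simp [collapseStep, hl, hc]
      have h2 : collapseStep acc ch = acc ++ [ch] := by
        simp [collapseStep, hc]
      rw [h1, h2, ih _ (by simp)]
    · push_neg at hc
      have h1 : collapseStep (pre ++ acc) ch = pre ++ acc := by
        simp [collapseStep, hl, hc, h]
      have h2 : collapseStep acc ch = acc := by
        simp [collapseStep, hc, h]
      rw [h1, h2, ih _ h]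

-- with last emitted symbol k, the collapse loop ignores a leading run of k's
theorem collapse_dropRun (l : List Char) (acc : List Char) (k : Char)
    (h : acc.getLast? = some k) :
    (l.map shapeClass).foldl collapseStep acc
      = ((l.dropWhile (fun d => shapeClass d = k)).map shapeClass).foldl collapseStep acc := by
  induction l with
  | nil => rfl
  | cons c t ih =>
    by_cases hc : shapeClass c = k
    · have hne : acc ≠ [] := by intro he; rw [he] at h; simp at h
      have hstep : collapseStep acc k = acc := by
        simp [collapseStep, h, hne]
      simp only [List.map_cons, List.foldl_cons, List.dropWhile_cons, hc, hstep]
      simpa [hc] using ih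
    · simp [List.dropWhile_cons, hc]

-- every element surviving dropWhile's front: the head fails the predicate
theorem dropWhile_head_not {p : Char → Bool} {l : List Char} {c : Char} {r : List Char}
    (h : l.dropWhile p = c :: r) : p c = false := by
  have := List.head?_dropWhile_not p l
  rw [h] at this
  simpa using this

-- main: A's collapse of the classified list equals B's run scan
theorem collapse_eq_runScan (l : List Char) :
    (l.map shapeClass).foldl collapseStep [] = runScan l := by
  induction l using runScan.induct with
  | case1 => simp [runScan]
  | case2 c t ih =>
    simp only [List.map_cons, List.foldl_cons, runScan]
    have h1 : collapseStep [] (shapeClass c) = [shapeClass c] := by simp [collapseStep]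
    rw [h1, collapse_dropRun t [shapeClass c] (shapeClass c) (by simp)]
    set t' := t.dropWhile (fun d => shapeClass d = shapeClass c) with ht'
    cases htt : t' with
    | nil => simp [runScan]
    | cons c' r =>
      have hne : shapeClass c' ≠ shapeClass c := by
        have := dropWhile_head_not (ht' ▸ htt)
        simpa using this
      rw [htt] at ih
      have h2 : collapseStep [shapeClass c] (shapeClass c') = [shapeClass c] ++ [shapeClass c'] := by
        simp [collapseStep, Ne.symm hne]
      simp only [List.map_cons, List.foldl_cons, h2]
      rw [collapse_prefix _ [shapeClass c] [shapeClass c'] (by simp)]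
      have h3 : collapseStep [] (shapeClass c') = [shapeClass c'] := by simp [collapseStep]
      rw [← h3, ← List.foldl_cons, ← List.map_cons, ih]
      rfl

-- ===== VERDICT (by name: the statement is the Claim_ definition above) =====
theorem get_word_shape_spec : Claim_equal_get_word_shape := by
  intro word _
  unfold Spec_get_word_shape get_word_shape get_word_shape_alt
  rw [shape_foldl_eq_map]
  simp only [List.nil_append]
  rw [show (fun (acc : List Char) (ch : Char) =>
        if acc = [] ∨ acc.getLast? ≠ some ch then acc ++ [ch] else acc) = collapseStep from rfl]
  rw [collapse_eq_runScan]
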